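-- pv_equiv track=rewrite | github.com/mueedurrehman/Python-Interview-Practice | CH7.py | num_of_common_elements_v2
-- ===== SOURCE A (Python) =====
-- def num_of_common_elements_v2(a,b):
--     indexb = 0
--     count = 0
--     for element in a:
--         for i in range(indexb, len(b)):
--             if b[i] == element:
--                 count += 1
--                 indexb = i
--     return count
-- ===== SOURCE B (Python) =====
-- def num_of_common_elements_v2(a, b):
--     # Index b once: value -> list of its positions (increasing).  For each element
--     # of a, count only that value's positions >= the current suffix start, instead
--     # of rescanning b's whole suffix as A does.
--     positions = {}
--     for i in range(len(b)):
--         positions.setdefault(b[i], []).append(i)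
--     s = 0
--     count = 0
--     for v in a:
--         pos = positions.get(v, [])
--         c = len([p for p in pos if p >= s])
--         if c > 0:
--             count += c
--             s = pos[-1]
--     return count
-- ===== Notes on version B (the rewrite author's own statement) =====
-- stated objective: faster
-- what changed: B indexes b once into a value-to-positions dict and, per element of a, counts only that value's positions at or after the current suffix start (taking the list's last entry as the new start), instead of A's rescan of b's whole suffix for every element of a.
import Mathlib
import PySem

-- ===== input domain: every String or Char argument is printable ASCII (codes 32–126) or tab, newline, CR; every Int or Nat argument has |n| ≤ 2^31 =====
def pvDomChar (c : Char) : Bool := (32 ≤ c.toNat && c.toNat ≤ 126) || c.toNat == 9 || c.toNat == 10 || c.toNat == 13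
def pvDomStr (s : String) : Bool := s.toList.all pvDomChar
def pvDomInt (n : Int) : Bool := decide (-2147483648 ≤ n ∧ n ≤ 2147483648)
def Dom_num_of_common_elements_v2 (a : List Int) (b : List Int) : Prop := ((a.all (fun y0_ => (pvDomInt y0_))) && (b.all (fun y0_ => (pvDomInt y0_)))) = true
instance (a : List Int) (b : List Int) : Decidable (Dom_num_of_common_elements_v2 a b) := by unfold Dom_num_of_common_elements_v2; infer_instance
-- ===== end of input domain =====

-- B replaces A's rescans of b's suffix by a one-time index of b (value -> position list),
-- counting per element only that value's positions at or after the suffix start (objective: faster).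

-- ===== PORT A =====
-- state (indexb, count); b[i] is always in range (0 ≤ indexb and indexb ≤ i < len b), so pyGetD is exact here
def num_of_common_elements_v2 (a : List Int) (b : List Int) : Int :=
  (a.foldl (fun (st : Int × Int) element =>
      (PySem.List.pyRange st.1 (b.length : Int) 1).foldl
        (fun (st2 : Int × Int) i =>
          if PySem.List.pyGetD b i 0 = element then (i, st2.2 + 1) else st2)
        st)
    ((0 : Int), (0 : Int))).2

-- ===== PORT B =====
-- positions.setdefault(b[i], []).append(i)  =  Dict.modify (b[i]) [] (· ++ [i]); b[i] in range as i runs over range(len(b))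
def pvBuildPos (b : List Int) : PySem.Dict Int (List Int) :=
  (PySem.List.pyRange 0 (b.length : Int) 1).foldl
    (fun d i => d.modify (PySem.List.pyGetD b i 0) [] (fun l => l ++ [i]))
    PySem.Dict.empty

-- state (s, count); pos[-1] is in range because c > 0 forces pos ≠ [], so pyGetD is exact here
def num_of_common_elements_v2_alt (a : List Int) (b : List Int) : Int :=
  let d := pvBuildPos b
  (a.foldl (fun (st : Int × Int) v =>
      let pos := d.getD v []
      let c : Int := ((pos.filter (fun p => decide (st.1 ≤ p))).length : Int)
      if c > 0 then (PySem.List.pyGetD pos (-1) st.1, st.2 + c) else st)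
    ((0 : Int), (0 : Int))).2

-- ===== PRECONDITION & SPEC =====
def Spec_num_of_common_elements_v2 (a : List Int) (b : List Int) (out : Int) : Prop := out = num_of_common_elements_v2_alt a b
instance (a : List Int) (b : List Int) (out : Int) : Decidable (Spec_num_of_common_elements_v2 a b out) := by unfold Spec_num_of_common_elements_v2; infer_instance

-- ===== CLAIM (what is proved, stated in full; the proofs are below) =====
def Claim_equal_num_of_common_elements_v2 : Prop := ∀ (a : List Int) (b : List Int), Dom_num_of_common_elements_v2 a b → Spec_num_of_common_elements_v2 a b (num_of_common_elements_v2 a b)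

-- ===== LEMMAS AND PROOFS =====

-- the increasing list of positions of v in b
def pvPos (b : List Int) (v : Int) : List Int :=
  (PySem.List.pyRange 0 (b.length : Int) 1).filter (fun i => PySem.List.pyGetD b i 0 == v)

lemma pv_dict_getD (b : List Int) (v : Int) :
    (pvBuildPos b).getD v [] = pvPos b v := by
  unfold pvBuildPos pvPos
  rw [show (PySem.List.pyRange 0 (b.length : Int) 1).foldl
        (fun d i => d.modify (PySem.List.pyGetD b i 0) [] (fun l => l ++ [i]))
        PySem.Dict.empty
      = ((PySem.List.pyRange 0 (b.length : Int) 1).map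
          (fun i => (PySem.List.pyGetD b i 0, i))).foldl
          (fun d p => d.modify p.1 [] (fun l => l ++ [p.2])) PySem.Dict.empty
    from (List.foldl_map (f := fun i => (PySem.List.pyGetD b i 0, i))
      (g := fun d p => d.modify p.1 [] (fun l => l ++ [p.2]))
      (l := PySem.List.pyRange 0 (b.length : Int) 1) (init := PySem.Dict.empty)).symm]
  rw [PySem.Dict.getD_foldl_modify_append]
  simp [List.filter_map, Function.comp_def]

lemma pv_pos_sorted (b : List Int) (v : Int) : (pvPos b v).Pairwise (· < ·) :=
  (PySem.List.pairwise_lt_pyRange_one 0 (b.length : Int)).filter _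

lemma pv_pos_bounds (b : List Int) (v : Int) {p : Int} (hp : p ∈ pvPos b v) :
    0 ≤ p ∧ p < (b.length : Int) := by
  unfold pvPos at hp
  rw [List.mem_filter] at hp
  have := (PySem.List.mem_pyRange_one).mp hp.1
  omega

lemma pv_getLastD_cons (x : Int) (l : List Int) (d : Int) :
    (x :: l).getLast?.getD d = l.getLast?.getD x := by
  cases l with
  | nil => rfl
  | cons y t =>
    rw [List.getLast?_cons_cons]
    cases hz : (y :: t).getLast? with
    | none => simp [List.getLast?_eq_none_iff] at hz
    | some z => rfl

lemma pv_inner (b : List Int) (v : Int) (r : List Int) : ∀ (s c : Int),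
    r.foldl (fun (st2 : Int × Int) i =>
        if PySem.List.pyGetD b i 0 = v then (i, st2.2 + 1) else st2) (s, c)
      = ((r.filter (fun i => PySem.List.pyGetD b i 0 == v)).getLast?.getD s,
         c + ((r.filter (fun i => PySem.List.pyGetD b i 0 == v)).length : Int)) := by
  induction r with
  | nil => intro s c; simp
  | cons i r ih =>
    intro s c
    by_cases h : PySem.List.pyGetD b i 0 = v
    · simp only [List.foldl_cons, List.filter_cons, h, beq_self_eq_true, ite_true,
        List.length_cons]
      rw [ih i (c + 1), pv_getLastD_cons]
      refine Prod.ext rfl ?_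
      push_cast; ring
    · simp only [List.foldl_cons, if_neg h, List.filter_cons]
      rw [show (PySem.List.pyGetD b i 0 == v) = false by simpa using h]
      exact ih s c

lemma pv_range_filter (m s : Int) (hs : 0 ≤ s) :
    PySem.List.pyRange s m 1 = (PySem.List.pyRange 0 m 1).filter (fun i => decide (s ≤ i)) := by
  by_cases h : s ≤ m
  · rw [PySem.List.pyRange_one_append 0 s m hs h, List.filter_append]
    rw [List.filter_eq_nil_iff.mpr (by
      intro x hx
      have := (PySem.List.mem_pyRange_one).mp hx
      simpa using by omega)]
    rw [List.filter_eq_self.mpr (by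
      intro x hx
      have := (PySem.List.mem_pyRange_one).mp hx
      simpa using by omega)]
    simp
  · rw [PySem.List.pyRange_one_eq_nil (by omega)]
    rw [eq_comm, List.filter_eq_nil_iff]
    intro x hx
    have := (PySem.List.mem_pyRange_one).mp hx
    simpa using by omega

lemma pv_suffix (b : List Int) (v s : Int) (hs : 0 ≤ s) :
    (PySem.List.pyRange s (b.length : Int) 1).filter (fun i => PySem.List.pyGetD b i 0 == v)
      = (pvPos b v).filter (fun p => decide (s ≤ p)) := by
  rw [pv_range_filter (b.length : Int) s hs]
  exact List.filter_comm _ _ _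

lemma pv_last_filter (l : List Int) (s : Int) (hl : l.Pairwise (· < ·))
    (hne : l.filter (fun p => decide (s ≤ p)) ≠ []) :
    (l.filter (fun p => decide (s ≤ p))).getLast? = l.getLast? := by
  induction l with
  | nil => simp at hne
  | cons x t ih =>
    rw [List.pairwise_cons] at hl
    by_cases h : s ≤ x
    · rw [List.filter_cons, if_pos (by simpa using h)]
      rw [List.filter_eq_self.mpr (by intro y hy; have := hl.1 y hy; simpa using by omega)]
    · rw [List.filter_cons, if_neg (by simpa using h)] at hne ⊢
      have htne : t ≠ [] := by
        intro he; rw [he] at hne; simp at hne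
      cases t with
      | nil => simp at htne
      | cons y u =>
        rw [List.getLast?_cons_cons]
        exact ih hl.2 hne

lemma pv_outer (b : List Int) (a : List Int) : ∀ (s c : Int), 0 ≤ s →
    a.foldl (fun (st : Int × Int) element =>
        (PySem.List.pyRange st.1 (b.length : Int) 1).foldl
          (fun (st2 : Int × Int) i =>
            if PySem.List.pyGetD b i 0 = element then (i, st2.2 + 1) else st2)
          st) (s, c)
    = a.foldl (fun (st : Int × Int) v =>
        if ((((pvPos b v).filter (fun p => decide (st.1 ≤ p))).length : Int)) > 0 then
          (PySem.List.pyGetD (pvPos b v) (-1) st.1,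
           st.2 + (((pvPos b v).filter (fun p => decide (st.1 ≤ p))).length : Int))
        else st) (s, c) := by
  induction a with
  | nil => intro s c _; rfl
  | cons v t ih =>
    intro s c hs
    simp only [List.foldl_cons]
    rw [pv_inner b v _ s c, pv_suffix b v s hs]
    by_cases hF : (pvPos b v).filter (fun p => decide (s ≤ p)) = []
    · rw [hF]
      simp only [List.getLast?_nil, Option.getD_none, List.length_nil, Nat.cast_zero, add_zero,
        gt_iff_lt, lt_irrefl, ite_false]
      exact ih s c hs
    · have hpos : pvPos b v ≠ [] := by
        intro he; rw [he] at hF; simp at hF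
      have hlen : ((((pvPos b v).filter (fun p => decide (s ≤ p))).length : Int)) > 0 := by
        have := List.length_pos_iff.mpr hF
        exact_mod_cast this
      rw [if_pos hlen, pv_last_filter (pvPos b v) s (pv_pos_sorted b v) hF,
          PySem.List.pyGetD_neg_one (xs := pvPos b v) (h := hpos),
          List.getLast?_eq_some_getLast hpos, Option.getD_some]
      have hmem : (pvPos b v).getLast hpos ∈ pvPos b v := List.getLast_mem hpos
      exact ih _ _ (pv_pos_bounds b v hmem).1

-- ===== VERDICT (by name: the statement is the Claim_ definition above) =====
theorem num_of_common_elements_v2_spec : Claim_equal_num_of_common_elements_v2 := by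
  intro a b _
  unfold Spec_num_of_common_elements_v2 num_of_common_elements_v2 num_of_common_elements_v2_alt
  simp only [pv_dict_getD]
  rw [pv_outer b a 0 0 (by omega)]
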